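-- pv_equiv track=rewrite | github.com/Poissonismyson/python | Laboratori/Laboratorio_5/Es12/Es12.py | scambiacolonne
-- ===== SOURCE A (Python) =====
-- def scambiacolonne(m,i1,i2):
--     if not m:
--         return m
--
--     lunghezza = len(m[0])
--     for i in range(len(m)):
--         if len(m[i]) != lunghezza:
--             return m
--
--     m1 = []
--
--     for i in range(len(m)):
--         riga = []
--         for j in range(len(m[i])):
--             if j == i1:
--                 riga.append(m[i][i2])
--             elif j == i2:
--                 riga.append(m[i][i1])
--             else:
--                 riga.append(m[i][j])
--         m1.append(riga)
--
--     return m1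
-- ===== SOURCE B (Python) =====
-- def scambiacolonne(m, i1, i2):
--     if not m:
--         return m
--     lunghezza = len(m[0])
--     if any(len(r) != lunghezza for r in m):
--         return m
--     if not (0 <= i1 < lunghezza and 0 <= i2 < lunghezza):
--         return [row[:] for row in m]
--     cols = [list(c) for c in zip(*m)]
--     cols[i1], cols[i2] = cols[i2], cols[i1]
--     return [list(r) for r in zip(*cols)]
-- ===== Notes on version B (the rewrite author's own statement) =====
-- stated objective: alternative
-- what changed: B transposes the matrix with zip(*m), swaps the two whole columns in one assignment when both indices are valid, and transposes back, instead of A's per-cell index tests inside every row.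
-- intended difference: On rectangular matrices where exactly one index is a valid column index and the other is negative in [-L,0) (and the two referenced columns differ), A returns a half-swap that duplicates the wrapped column into the valid one; B returns the matrix unchanged, the intended no-op for an invalid index pair. — e.g. on scambiacolonne([[1, 2, 3]], 0, -1): A returns [[3, 2, 3]], B returns [[1, 2, 3]]
import Mathlib
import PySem

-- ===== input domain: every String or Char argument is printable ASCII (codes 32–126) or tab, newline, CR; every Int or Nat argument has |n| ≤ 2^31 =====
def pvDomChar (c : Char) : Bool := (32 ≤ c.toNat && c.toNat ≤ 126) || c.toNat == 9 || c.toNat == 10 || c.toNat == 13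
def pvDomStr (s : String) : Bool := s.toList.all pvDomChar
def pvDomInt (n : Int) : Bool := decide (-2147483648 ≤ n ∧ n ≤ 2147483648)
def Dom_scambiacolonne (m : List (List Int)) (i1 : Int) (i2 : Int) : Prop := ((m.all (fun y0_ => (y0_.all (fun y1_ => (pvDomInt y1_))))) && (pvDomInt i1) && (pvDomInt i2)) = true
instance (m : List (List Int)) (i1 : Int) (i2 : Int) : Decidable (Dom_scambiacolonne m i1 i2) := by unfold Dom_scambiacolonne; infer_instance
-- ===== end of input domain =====

-- B swaps two whole columns after a zip-transpose instead of testing every cell index;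
-- objective: alternative decomposition (column-level swap), no speed claim.
-- On a half-valid index pair (one index in range, the other negative) A returns an
-- asymmetric half-swap; B treats the pair as invalid and returns the matrix unchanged (D_ below).

-- ===== PORT A =====
def scambiacolonne (m : List (List Int)) (i1 : Int) (i2 : Int) : List (List Int) :=
  match m with
  | [] => m
  | r0 :: _ =>
    let lunghezza := r0.length
    -- 'for i in range(len(m)): if len(m[i]) != lunghezza: return m' — early return iff some row differs
    if m.any (fun r => r.length ≠ lunghezza) then m
    else
      m.map (fun row =>
        (List.range row.length).map (fun (j : Nat) =>
          -- m[i][i2] / m[i][i1]: Python indexing; '.getD 0' is unreachable inside Pre_ (no IndexError there)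
          if (j : Int) = i1 then (PySem.List.pyGet? row i2).getD 0
          else if (j : Int) = i2 then (PySem.List.pyGet? row i1).getD 0
          else (PySem.List.pyGet? row (j : Int)).getD 0))

-- ===== PORT B =====
-- zip(*m) of Source B: exact at its only call sites, where every row of m has length L
def pvColsB (m : List (List Int)) (L : Nat) : List (List Int) :=
  (List.range L).map (fun j => m.map (fun r => r.getD j 0))

def scambiacolonne_alt (m : List (List Int)) (i1 : Int) (i2 : Int) : List (List Int) :=
  match m with
  | [] => m
  | r0 :: _ =>
    let lunghezza := r0.length
    if m.any (fun r => r.length ≠ lunghezza) then m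
    else if ¬ (0 ≤ i1 ∧ i1 < (lunghezza : Int) ∧ 0 ≤ i2 ∧ i2 < (lunghezza : Int)) then
      m.map (fun row => row)   -- [row[:] for row in m]
    else
      let cols := pvColsB m lunghezza
      -- cols[i1], cols[i2] = cols[i2], cols[i1]
      let cols' := (cols.set i1.toNat (cols.getD i2.toNat [])).set i2.toNat (cols.getD i1.toNat [])
      pvColsB cols' m.length   -- [list(r) for r in zip(*cols)]

-- ===== PRECONDITION & SPEC =====
-- Pre_ excludes exactly the inputs where A raises IndexError: a rectangular non-empty matrix
-- with one index a valid column index and the other outside Python's index range [-L, L).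
def Pre_scambiacolonne (m : List (List Int)) (i1 : Int) (i2 : Int) : Prop :=
  m = [] ∨ (∃ r ∈ m, r.length ≠ (m.headD []).length) ∨
    ¬ ((0 ≤ i1 ∧ i1 < ((m.headD []).length : Int) ∧ ¬ (-((m.headD []).length : Int) ≤ i2 ∧ i2 < ((m.headD []).length : Int))) ∨
       (0 ≤ i2 ∧ i2 < ((m.headD []).length : Int) ∧ ¬ (-((m.headD []).length : Int) ≤ i1 ∧ i1 < ((m.headD []).length : Int))))
instance (m : List (List Int)) (i1 : Int) (i2 : Int) : Decidable (Pre_scambiacolonne m i1 i2) := by unfold Pre_scambiacolonne; infer_instance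

def pvWitness_scambiacolonne : List (List Int) × Int × Int := ([[1, 2], [3, 4]], 0, 1)

-- On a rectangular matrix with exactly one index a valid column index and the other negative in
-- [-L, 0) (and the two referenced columns not identical), A returns a half-swap that overwrites
-- the valid column with the wrapped one while leaving the wrapped column in place (duplicating a
-- column); B returns the matrix unchanged, the intended no-op for an invalid index pair.
def D_scambiacolonne (m : List (List Int)) (i1 : Int) (i2 : Int) : Prop :=
  min i1 i2 < 0 ∧ 0 ≤ max i1 i2 ∧ max i1 i2 < (m.headD []).length ∧
    (∀ r ∈ m, r.length = (m.headD []).length) ∧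
    ∃ r ∈ m, PySem.List.pyGet? r (max i1 i2) ≠ PySem.List.pyGet? r (min i1 i2)
instance (m : List (List Int)) (i1 : Int) (i2 : Int) : Decidable (D_scambiacolonne m i1 i2) := by unfold D_scambiacolonne; infer_instance

def Spec_scambiacolonne (m : List (List Int)) (i1 : Int) (i2 : Int) (out : List (List Int)) : Prop := ¬ D_scambiacolonne m i1 i2 → out = scambiacolonne_alt m i1 i2
instance (m : List (List Int)) (i1 : Int) (i2 : Int) (out : List (List Int)) : Decidable (Spec_scambiacolonne m i1 i2 out) := by unfold Spec_scambiacolonne; infer_instance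

def pvDiffWitness_scambiacolonne : List (List Int) × Int × Int := ([[1, 2, 3]], 0, -1)
def pvDiffWitnessOut_scambiacolonne : (List (List Int)) × (List (List Int)) := ([[3, 2, 3]], [[1, 2, 3]])

-- ===== CLAIM (what is proved, stated in full; the proofs are below) =====
def Claim_unchanged_scambiacolonne : Prop := ∀ (m : List (List Int)) (i1 : Int) (i2 : Int), Dom_scambiacolonne m i1 i2 → Pre_scambiacolonne m i1 i2 → Spec_scambiacolonne m i1 i2 (scambiacolonne m i1 i2)
def Claim_changed_scambiacolonne : Prop := Dom_scambiacolonne (pvDiffWitness_scambiacolonne.1) (pvDiffWitness_scambiacolonne.2.1) (pvDiffWitness_scambiacolonne.2.2) ∧ Pre_scambiacolonne (pvDiffWitness_scambiacolonne.1) (pvDiffWitness_scambiacolonne.2.1) (pvDiffWitness_scambiacolonne.2.2) ∧ D_scambiacolonne (pvDiffWitness_scambiacolonne.1) (pvDiffWitness_scambiacolonne.2.1) (pvDiffWitness_scambiacolonne.2.2) ∧ scambiacolonne (pvDiffWitness_scambiacolonne.1) (pvDiffWitness_scambiacolonne.2.1) (pvDiffWitness_scambiacolonne.2.2) = pvDiffWitnessOut_scambiacolonne.1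 ∧ scambiacolonne_alt (pvDiffWitness_scambiacolonne.1) (pvDiffWitness_scambiacolonne.2.1) (pvDiffWitness_scambiacolonne.2.2) = pvDiffWitnessOut_scambiacolonne.2 ∧ pvDiffWitnessOut_scambiacolonne.1 ≠ pvDiffWitnessOut_scambiacolonne.2
def Claim_exact_scambiacolonne : Prop := ∀ (m : List (List Int)) (i1 : Int) (i2 : Int), Dom_scambiacolonne m i1 i2 → Pre_scambiacolonne m i1 i2 → D_scambiacolonne m i1 i2 → scambiacolonne m i1 i2 ≠ scambiacolonne_alt m i1 i2


-- ===== LEMMAS AND PROOFS =====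

theorem pv_colsB_length (m : List (List Int)) (L : Nat) : (pvColsB m L).length = L := by
  simp [pvColsB]

theorem pv_colsB_getElem (m : List (List Int)) (L : Nat) (j : Nat) (hj : j < (pvColsB m L).length) :
    (pvColsB m L)[j] = m.map (fun r => r.getD j 0) := by
  simp [pvColsB]

theorem pv_colsB_getD (m : List (List Int)) (L : Nat) (j : Nat) (hj : j < L) :
    (pvColsB m L).getD j [] = m.map (fun r => r.getD j 0) := by
  rw [List.getD_eq_getElem _ _ (by simp [pv_colsB_length, hj])]
  exact pv_colsB_getElem _ _ _ _

theorem pv_mapcol_getD (m : List (List Int)) (k i : Nat) (hi : i < m.length) :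
    (List.map (fun r => r.getD k 0) m).getD i 0 = m[i].getD k 0 := by
  rw [List.getD_eq_getElem _ _ (by simpa using hi), List.getElem_map]

theorem pv_map_range_getElem {α : Type} (n : Nat) (f : Nat → α) (j : Nat)
    (hj : j < ((List.range n).map f).length) : ((List.range n).map f)[j] = f j := by
  simp

-- both indices valid: A's cell-by-cell swapped rows = B's transpose/column-swap/transpose
theorem pv_swap_case (m : List (List Int)) (L : Nat) (i1 i2 : Int)
    (hrect : ∀ r ∈ m, r.length = L)
    (h1 : 0 ≤ i1) (h1' : i1 < (L : Int)) (h2 : 0 ≤ i2) (h2' : i2 < (L : Int)) :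
    m.map (fun row => (List.range row.length).map (fun (j : Nat) =>
      if (j : Int) = i1 then (PySem.List.pyGet? row i2).getD 0
      else if (j : Int) = i2 then (PySem.List.pyGet? row i1).getD 0
      else (PySem.List.pyGet? row (j : Int)).getD 0))
    = pvColsB (((pvColsB m L).set i1.toNat ((pvColsB m L).getD i2.toNat [])).set i2.toNat ((pvColsB m L).getD i1.toNat [])) m.length := by
  have ha : i1.toNat < L := by omega
  have hb : i2.toNat < L := by omega
  rw [pv_colsB_getD _ _ _ ha, pv_colsB_getD _ _ _ hb]
  apply List.ext_getElem
  · simp [pvColsB]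
  · intro i hi hi'
    have him : i < m.length := by simpa using hi
    have hrow : m[i].length = L := hrect _ (List.getElem_mem _)
    rw [List.getElem_map,
        pv_colsB_getElem _ _ _ (by rw [pv_colsB_length]; exact him)]
    apply List.ext_getElem
    · simp [hrow, pv_colsB_length]
    · intro j hj hj'
      have hjL : j < L := by simpa [hrow] using hj
      rw [pv_map_range_getElem, List.getElem_map, List.getElem_set, List.getElem_set,
          pv_colsB_getElem _ _ _ (by rw [pv_colsB_length]; exact hjL),
          apply_ite (fun (l : List Int) => l.getD i 0),
          apply_ite (fun (l : List Int) => l.getD i 0)]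
      simp only [pv_mapcol_getD _ _ _ him]
      have e1 : PySem.List.pyGet? m[i] i1 = some (m[i].getD i1.toNat 0) := by
        rw [PySem.List.pyGet?_eq_some_getElem _ h1 (by omega),
            List.getD_eq_getElem _ _ (by omega)]
      have e2 : PySem.List.pyGet? m[i] i2 = some (m[i].getD i2.toNat 0) := by
        rw [PySem.List.pyGet?_eq_some_getElem _ h2 (by omega),
            List.getD_eq_getElem _ _ (by omega)]
      have e3 : PySem.List.pyGet? m[i] (j : Int) = some (m[i].getD j 0) := by
        rw [PySem.List.pyGet?_eq_some_getElem _ (by omega) (by omega),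
            List.getD_eq_getElem _ _ (by omega)]
        simp
      rw [e1, e2, e3]
      simp only [Option.getD_some]
      split_ifs with c1 c2 c3 c4 <;>
        first
          | rfl
          | omega
          | (congr 1; omega)

-- invalid index pair: A's rebuilt rows are the rows themselves whenever every value A would
-- place equals the value already there
theorem pv_copy_case (m : List (List Int)) (L : Nat) (i1 i2 : Int)
    (hrect : ∀ r ∈ m, r.length = L)
    (hg1 : ∀ r ∈ m, 0 ≤ i1 → i1 < (L : Int) → (PySem.List.pyGet? r i2).getD 0 = r.getD i1.toNat 0)
    (hg2 : ∀ r ∈ m, 0 ≤ i2 → i2 < (L : Int) → (PySem.List.pyGet? r i1).getD 0 = r.getD i2.toNat 0) :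
    m.map (fun row => (List.range row.length).map (fun (j : Nat) =>
      if (j : Int) = i1 then (PySem.List.pyGet? row i2).getD 0
      else if (j : Int) = i2 then (PySem.List.pyGet? row i1).getD 0
      else (PySem.List.pyGet? row (j : Int)).getD 0))
    = m.map (fun row => row) := by
  apply List.map_congr_left
  intro row hrow
  have hL : row.length = L := hrect _ hrow
  apply List.ext_getElem
  · simp
  · intro j hj hj'
    have hjL : j < row.length := by simpa using hj
    rw [pv_map_range_getElem]
    have e3 : PySem.List.pyGet? row (j : Int) = some row[j] := by
      rw [PySem.List.pyGet?_eq_some_getElem _ (by omega) (by omega)]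
      simp
    split_ifs with c1 c2
    · rw [hg1 _ hrow (by omega) (by omega), List.getD_eq_getElem _ _ (by omega)]
      congr 1; omega
    · rw [hg2 _ hrow (by omega) (by omega), List.getD_eq_getElem _ _ (by omega)]
      congr 1; omega
    · rw [e3]; rfl

-- a negative in-range Python index reads the wrapped element
theorem pv_pyGet_neg (r : List Int) (i : Int) (hneg : i < 0) (hge : -(r.length : Int) ≤ i) :
    PySem.List.pyGet? r i = some (r.getD (i + (r.length : Int)).toNat 0) := by
  have hi : i = -(((-i).toNat : Nat) : Int) := by omega
  rw [hi, PySem.List.pyGet?_neg_natCast r (-i).toNat (by omega) (by omega),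
      List.getElem?_eq_getElem (by omega), List.getD_eq_getElem _ _ (by omega)]
  congr 2
  omega

theorem pv_pyGet_pos (r : List Int) (i : Int) (h0 : 0 ≤ i) (h1 : i < (r.length : Int)) :
    PySem.List.pyGet? r i = some (r.getD i.toNat 0) := by
  rw [PySem.List.pyGet?_eq_some_getElem _ h0 (by omega), List.getD_eq_getElem _ _ (by omega)]

-- ===== VERDICT (by name: the statement is the Claim_ definition above) =====
theorem scambiacolonne_spec : Claim_unchanged_scambiacolonne := by
  intro m i1 i2 hdom hpre
  unfold Spec_scambiacolonne
  intro hnd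
  cases m with
  | nil => rfl
  | cons r0 rest =>
    simp only [Pre_scambiacolonne, List.headD_cons] at hpre
    simp only [D_scambiacolonne, List.headD_cons] at hnd
    simp only [scambiacolonne, scambiacolonne_alt]
    by_cases hrag : ((r0 :: rest).any (fun r => decide (r.length ≠ r0.length)) = true)
    · rw [if_pos hrag, if_pos hrag]
    · have hrect : ∀ r ∈ r0 :: rest, r.length = r0.length := by
        intro r hr
        have := (List.any_eq_false.mp (Bool.eq_false_iff.mpr hrag)) r hr
        simpa using this
      have hnr : ¬ ((0 ≤ i1 ∧ i1 < (r0.length : Int) ∧ ¬ (-(r0.length : Int) ≤ i2 ∧ i2 < (r0.length : Int))) ∨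
          (0 ≤ i2 ∧ i2 < (r0.length : Int) ∧ ¬ (-(r0.length : Int) ≤ i1 ∧ i1 < (r0.length : Int)))) := by
        rcases hpre with h | h | h
        · exact absurd h (by simp)
        · rcases h with ⟨r, hr, hne⟩; exact absurd (hrect r hr) hne
        · exact h
      rw [if_neg hrag, if_neg hrag]
      by_cases hboth : 0 ≤ i1 ∧ i1 < ((r0.length : Nat) : Int) ∧ 0 ≤ i2 ∧ i2 < ((r0.length : Nat) : Int)
      · rw [if_neg (not_not_intro hboth)]
        exact pv_swap_case _ _ _ _ hrect hboth.1 hboth.2.1 hboth.2.2.1 hboth.2.2.2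
      · rw [if_pos hboth]
        have hnd' : ¬ ((0 ≤ i1 ∧ i1 < (r0.length : Int) ∧ -(r0.length : Int) ≤ i2 ∧ i2 < 0 ∧
              ∃ r ∈ r0 :: rest, r.getD i1.toNat 0 ≠ r.getD (i2 + (r0.length : Int)).toNat 0) ∨
            (0 ≤ i2 ∧ i2 < (r0.length : Int) ∧ -(r0.length : Int) ≤ i1 ∧ i1 < 0 ∧
              ∃ r ∈ r0 :: rest, r.getD i2.toNat 0 ≠ r.getD (i1 + (r0.length : Int)).toNat 0)) := by
          intro hd
          apply hnd
          rcases hd with ⟨a1, b1, c1, d1, r, hr, hne⟩ | ⟨a1, b1, c1, d1, r, hr, hne⟩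
          · refine ⟨by omega, by omega, by omega, hrect, r, hr, ?_⟩
            rw [show max i1 i2 = i1 by omega, show min i1 i2 = i2 by omega,
                pv_pyGet_pos r i1 a1 (by rw [hrect r hr]; exact b1),
                pv_pyGet_neg r i2 d1 (by rw [hrect r hr]; exact c1), hrect r hr]
            exact fun h => hne (Option.some.inj h)
          · refine ⟨by omega, by omega, by omega, hrect, r, hr, ?_⟩
            rw [show max i1 i2 = i2 by omega, show min i1 i2 = i1 by omega,
                pv_pyGet_pos r i2 a1 (by rw [hrect r hr]; exact b1),
                pv_pyGet_neg r i1 d1 (by rw [hrect r hr]; exact c1), hrect r hr]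
            exact fun h => hne (Option.some.inj h)
        apply pv_copy_case _ r0.length _ _ hrect
        · intro r hr h1a h1b
          have hv2 : ¬ (0 ≤ i2 ∧ i2 < (r0.length : Int)) := fun hv2 => hboth ⟨h1a, h1b, hv2.1, hv2.2⟩
          have hrange : -(r0.length : Int) ≤ i2 ∧ i2 < (r0.length : Int) := by
            by_contra hc
            exact hnr (Or.inl ⟨h1a, h1b, hc⟩)
          have hneg : i2 < 0 := by omega
          have heq : ∀ r' ∈ r0 :: rest, r'.getD i1.toNat 0 = r'.getD (i2 + (r0.length : Int)).toNat 0 := by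
            intro r' hr'
            by_contra hne
            exact hnd' (Or.inl ⟨h1a, h1b, hrange.1, hneg, r', hr', hne⟩)
          rw [pv_pyGet_neg r i2 hneg (by rw [hrect r hr]; exact hrange.1), Option.getD_some,
              hrect r hr]
          exact (heq r hr).symm
        · intro r hr h2a h2b
          have hv1 : ¬ (0 ≤ i1 ∧ i1 < (r0.length : Int)) := fun hv1 => hboth ⟨hv1.1, hv1.2, h2a, h2b⟩
          have hrange : -(r0.length : Int) ≤ i1 ∧ i1 < (r0.length : Int) := by
            by_contra hc
            exact hnr (Or.inr ⟨h2a, h2b, hc⟩)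
          have hneg : i1 < 0 := by omega
          have heq : ∀ r' ∈ r0 :: rest, r'.getD i2.toNat 0 = r'.getD (i1 + (r0.length : Int)).toNat 0 := by
            intro r' hr'
            by_contra hne
            exact hnd' (Or.inr ⟨h2a, h2b, hrange.1, hneg, r', hr', hne⟩)
          rw [pv_pyGet_neg r i1 hneg (by rw [hrect r hr]; exact hrange.1), Option.getD_some,
              hrect r hr]
          exact (heq r hr).symm

theorem scambiacolonne_changed : Claim_changed_scambiacolonne := by
  unfold Claim_changed_scambiacolonne; decide

theorem scambiacolonne_tight : Claim_exact_scambiacolonne := by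
  intro m i1 i2 hdom hpre hd heq
  cases m with
  | nil => simp [D_scambiacolonne] at hd
  | cons r0 rest =>
    simp only [Pre_scambiacolonne, List.headD_cons] at hpre
    simp only [D_scambiacolonne, List.headD_cons] at hd
    obtain ⟨hmin0, hmax0, hmaxL, hrect, r, hr, hne⟩ := hd
    have hnr : ¬ ((0 ≤ i1 ∧ i1 < (r0.length : Int) ∧ ¬ (-(r0.length : Int) ≤ i2 ∧ i2 < (r0.length : Int))) ∨
        (0 ≤ i2 ∧ i2 < (r0.length : Int) ∧ ¬ (-(r0.length : Int) ≤ i1 ∧ i1 < (r0.length : Int)))) := by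
      rcases hpre with h | h | h
      · exact absurd h (by simp)
      · rcases h with ⟨r', hr', hne'⟩; exact absurd (hrect r' hr') hne'
      · exact h
    have hgem : -(r0.length : Int) ≤ min i1 i2 := by omega
    simp only [scambiacolonne, scambiacolonne_alt] at heq
    have hragF : ¬((r0 :: rest).any (fun r => decide (r.length ≠ r0.length)) = true) := by
      simp only [List.any_eq_true]
      rintro ⟨r, hr, hne⟩
      have hne' : r.length ≠ r0.length := by simpa using hne
      exact hne' (hrect r hr)
    rw [if_neg hragF, if_neg hragF] at heq
    by_cases h0 : 0 ≤ i1
    · have h1a : 0 ≤ i1 := h0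
      have h1b : i1 < (r0.length : Int) := by omega
      have h2a : -(r0.length : Int) ≤ i2 := by omega
      have h2b : i2 < 0 := by omega
      rw [show max i1 i2 = i1 by omega, show min i1 i2 = i2 by omega] at hne
      have hlen : r.length = r0.length := hrect r hr
      have hne : r.getD i1.toNat 0 ≠ r.getD (i2 + (r0.length : Int)).toNat 0 := by
        intro h
        apply hne
        rw [pv_pyGet_pos r i1 (by omega) (by omega), pv_pyGet_neg r i2 (by omega) (by omega), h, hlen]
      have hnb : ¬ (0 ≤ i1 ∧ i1 < ((r0.length : Nat) : Int) ∧ 0 ≤ i2 ∧ i2 < ((r0.length : Nat) : Int)) := by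
        intro hb; omega
      rw [if_pos hnb] at heq
      obtain ⟨i, hi, hir⟩ := List.getElem_of_mem hr
      have h1 := List.getElem_of_eq heq (show i < ((r0 :: rest).map _).length by simpa using hi)
      simp only [List.getElem_map] at h1
      rw [hir] at h1
      have hj : i1.toNat < r.length := by omega
      have h2 := List.getElem_of_eq h1 (show i1.toNat < ((List.range r.length).map _).length by simpa using hj)
      rw [pv_map_range_getElem, if_pos (show ((i1.toNat : Nat) : Int) = i1 by omega)] at h2
      have hval : (PySem.List.pyGet? r i2).getD 0 = r.getD (i2 + (r.length : Int)).toNat 0 := by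
        rw [pv_pyGet_neg r i2 h2b (by omega), Option.getD_some]
      exact hne (by rw [List.getD_eq_getElem _ _ hj, ← h2, hval, hlen])
    · have h1a : 0 ≤ i2 := by omega
      have h1b : i2 < (r0.length : Int) := by omega
      have h2a : -(r0.length : Int) ≤ i1 := by omega
      have h2b : i1 < 0 := by omega
      rw [show max i1 i2 = i2 by omega, show min i1 i2 = i1 by omega] at hne
      have hlen : r.length = r0.length := hrect r hr
      have hne : r.getD i2.toNat 0 ≠ r.getD (i1 + (r0.length : Int)).toNat 0 := by
        intro h
        apply hne
        rw [pv_pyGet_pos r i2 (by omega) (by omega), pv_pyGet_neg r i1 (by omega) (by omega), h, hlen]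
      have hnb : ¬ (0 ≤ i1 ∧ i1 < ((r0.length : Nat) : Int) ∧ 0 ≤ i2 ∧ i2 < ((r0.length : Nat) : Int)) := by
        intro hb; omega
      rw [if_pos hnb] at heq
      obtain ⟨i, hi, hir⟩ := List.getElem_of_mem hr
      have h1 := List.getElem_of_eq heq (show i < ((r0 :: rest).map _).length by simpa using hi)
      simp only [List.getElem_map] at h1
      rw [hir] at h1
      have hj : i2.toNat < r.length := by omega
      have h2 := List.getElem_of_eq h1 (show i2.toNat < ((List.range r.length).map _).length by simpa using hj)
      rw [pv_map_range_getElem, if_neg (show ¬ ((i2.toNat : Nat) : Int) = i1 by omega),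
          if_pos (show ((i2.toNat : Nat) : Int) = i2 by omega)] at h2
      have hval : (PySem.List.pyGet? r i1).getD 0 = r.getD (i1 + (r.length : Int)).toNat 0 := by
        rw [pv_pyGet_neg r i1 h2b (by omega), Option.getD_some]
      exact hne (by rw [List.getD_eq_getElem _ _ hj, ← h2, hval, hlen])
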